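-- pv_equiv track=rewrite | github.com/rampal-punia/python-learning-projects | number_series/helper_series.py | add_odd_pattern
-- ===== SOURCE A (Python) =====
-- def add_odd_pattern(n):
--     pattern_list = []
--     odd_list = [i for i in range(1, (n*2)+1) if i % 2 == 1]
--     x = 2
--     for i in range(1, n+1):
--         pattern_list.append(x)
--         x = x + odd_list[i-1]
--     return pattern_list
-- ===== SOURCE B (Python) =====
-- def add_odd_pattern(n):
--     # closed form: the cumulative sum of the first (i-1) odd numbers is (i-1)**2
--     return [2 + (i - 1) ** 2 for i in range(1, n + 1)]
-- ===== Notes on version B (the rewrite author's own statement) =====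
-- stated objective: simpler
-- what changed: Replaces the odd-number list and running-sum accumulator with a direct per-index closed form 2 + (i-1)**2.
import Mathlib
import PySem

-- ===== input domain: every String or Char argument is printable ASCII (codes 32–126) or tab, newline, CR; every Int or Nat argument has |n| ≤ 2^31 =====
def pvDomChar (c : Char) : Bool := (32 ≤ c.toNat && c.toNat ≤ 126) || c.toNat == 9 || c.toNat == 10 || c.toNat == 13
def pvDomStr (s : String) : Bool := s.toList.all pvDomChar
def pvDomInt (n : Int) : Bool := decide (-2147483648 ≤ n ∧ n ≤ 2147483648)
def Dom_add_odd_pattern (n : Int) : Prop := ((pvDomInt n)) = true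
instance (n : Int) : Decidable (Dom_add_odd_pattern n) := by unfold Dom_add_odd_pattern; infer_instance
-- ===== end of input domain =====

-- B replaces A's odd-number list and running-sum accumulator with the closed form 2 + (i-1)^2 (simpler).

-- ===== PORT A =====
-- odd_list[i-1] is always in range while the loop runs (odd_list has n elements),
-- so pyGetD with default 0 is exact here; Python A never raises.
def add_odd_pattern (n : Int) : List Int :=
  let odd_list := (PySem.List.pyRange 1 (n * 2 + 1)).filter (fun i => PySem.Int.mod i 2 == 1)
  ((PySem.List.pyRange 1 (n + 1)).foldl
    (fun (st : List Int × Int) i => (st.1 ++ [st.2], st.2 + PySem.List.pyGetD odd_list (i - 1) 0))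
    ([], 2)).1

-- ===== PORT B =====
def add_odd_pattern_alt (n : Int) : List Int :=
  (PySem.List.pyRange 1 (n + 1)).map (fun i => 2 + (i - 1) ^ 2)

-- ===== PRECONDITION & SPEC =====
def Spec_add_odd_pattern (n : Int) (out : List Int) : Prop := out = add_odd_pattern_alt n
instance (n : Int) (out : List Int) : Decidable (Spec_add_odd_pattern n out) := by unfold Spec_add_odd_pattern; infer_instance

-- ===== CLAIM (what is proved, stated in full; the proofs are below) =====
def Claim_equal_add_odd_pattern : Prop := ∀ (n : Int), Dom_add_odd_pattern n → Spec_add_odd_pattern n (add_odd_pattern n)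

-- ===== LEMMAS AND PROOFS =====

-- A's odd_list is exactly [1, 3, 5, …], the odd numbers 2k+1 for k < m.
lemma odd_filter (m : Nat) :
    (PySem.List.pyRange 1 ((m : Int) * 2 + 1)).filter (fun i => PySem.Int.mod i 2 == 1)
      = (List.range m).map (fun k : Nat => ((2 * k + 1 : Nat) : Int)) := by
  induction m with
  | zero => simp [PySem.List.pyRange_one_eq_nil]
  | succ m ih =>
    have e : ((m + 1 : Nat) : Int) * 2 + 1 = (m : Int) * 2 + 3 := by push_cast; ring
    have htail : PySem.List.pyRange ((m : Int) * 2 + 1) ((m : Int) * 2 + 3)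
        = [(m : Int) * 2 + 1, (m : Int) * 2 + 2] := by
      rw [PySem.List.pyRange_one_cons (show (m : Int) * 2 + 1 < (m : Int) * 2 + 3 by omega),
          show (m : Int) * 2 + 1 + 1 = (m : Int) * 2 + 2 by ring,
          PySem.List.pyRange_one_cons (show (m : Int) * 2 + 2 < (m : Int) * 2 + 3 by omega),
          PySem.List.pyRange_one_eq_nil (show (m : Int) * 2 + 3 ≤ (m : Int) * 2 + 2 + 1 by omega)]
    have hsplit : PySem.List.pyRange 1 (((m + 1 : Nat) : Int) * 2 + 1)
        = PySem.List.pyRange 1 ((m : Int) * 2 + 1) ++ [(m : Int) * 2 + 1, (m : Int) * 2 + 2] := by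
      rw [e, PySem.List.pyRange_one_append 1 ((m : Int) * 2 + 1) ((m : Int) * 2 + 3)
            (by omega) (by omega), htail]
    have h1 : PySem.Int.mod ((m : Int) * 2 + 1) 2 = 1 := by
      rw [PySem.Int.mod_eq_emod_of_pos (by omega)]; omega
    have h2 : PySem.Int.mod ((m : Int) * 2 + 2) 2 = 0 := by
      rw [PySem.Int.mod_eq_emod_of_pos (by omega)]; omega
    rw [hsplit, List.filter_append, ih, List.range_succ, List.map_append]
    simp only [List.filter_cons, List.filter_nil, h1, h2]
    norm_num
    ring

-- The loop invariant: after processing 1..k, pattern_list is the closed-form list and x = 2 + k².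
lemma loop_inv (n : Int) (k : Nat) (hk : (k : Int) ≤ n) :
    ((PySem.List.pyRange 1 ((k : Int) + 1)).foldl
        (fun (st : List Int × Int) i =>
          (st.1 ++ [st.2],
           st.2 + PySem.List.pyGetD
             ((PySem.List.pyRange 1 (n * 2 + 1)).filter (fun i => PySem.Int.mod i 2 == 1)) (i - 1) 0))
        ([], 2))
      = ((PySem.List.pyRange 1 ((k : Int) + 1)).map (fun i => 2 + (i - 1) ^ 2), 2 + (k : Int) ^ 2) := by
  induction k with
  | zero => simp [PySem.List.pyRange_one_eq_nil]
  | succ k ih =>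
    have hk' : (k : Int) ≤ n := by push_cast at hk ⊢; omega
    have hrange : PySem.List.pyRange 1 (((k + 1 : Nat) : Int) + 1)
        = PySem.List.pyRange 1 ((k : Int) + 1) ++ [(k : Int) + 1] := by
      rw [show (((k + 1 : Nat) : Int)) + 1 = ((k : Int) + 1) + 1 by push_cast; ring]
      exact PySem.List.pyRange_one_succ_right (by omega)
    have hm : n = ((n.toNat : Nat) : Int) := by omega
    have hmul : n * 2 + 1 = ((n.toNat : Nat) : Int) * 2 + 1 := by omega
    have hget : PySem.List.pyGetD
        ((PySem.List.pyRange 1 (n * 2 + 1)).filter (fun i => PySem.Int.mod i 2 == 1))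
        (((k : Int) + 1) - 1) 0 = 2 * (k : Int) + 1 := by
      rw [show (((k : Int) + 1) - 1) = ((k : Nat) : Int) by ring]
      rw [hmul, odd_filter, PySem.List.pyGetD_natCast,
          PySem.List.getD_map_range _ _ _ _ (by omega)]
      push_cast; ring
    rw [hrange, List.foldl_append, List.map_append, ih hk']
    simp only [List.foldl_cons, List.foldl_nil, List.map_cons, List.map_nil, hget,
      Prod.mk.injEq]
    constructor
    · congr 1; ring
    · push_cast; ring

theorem add_odd_pattern_spec : Claim_equal_add_odd_pattern := by
  intro n _
  unfold Spec_add_odd_pattern add_odd_pattern_alt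
  have heq : add_odd_pattern n
      = ((PySem.List.pyRange 1 (n + 1)).foldl
          (fun (st : List Int × Int) i =>
            (st.1 ++ [st.2],
             st.2 + PySem.List.pyGetD
               ((PySem.List.pyRange 1 (n * 2 + 1)).filter (fun i => PySem.Int.mod i 2 == 1))
               (i - 1) 0))
          ([], 2)).1 := rfl
  rw [heq]
  by_cases hn : n ≤ 0
  · rw [PySem.List.pyRange_one_eq_nil (show n + 1 ≤ 1 by omega)]; rfl
  · have hm : n = ((n.toNat : Nat) : Int) := by omega
    rw [hm, loop_inv ((n.toNat : Nat) : Int) n.toNat (le_refl _)]
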